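-- pv_equiv track=rewrite | github.com/jduron24/Cyber-security-co-pilot | src/cyber_fraudlens_adapter.py | parse_feature_name
-- ===== SOURCE A (Python) =====
-- def parse_feature_name(feature_name: str, base_columns: list[str]) -> tuple[str, str]:
--     if feature_name.startswith("num__") or feature_name.startswith("bool__"):
--         base = feature_name.split("__", 1)[1]
--         return base, base
--     if feature_name.startswith("cat__"):
--         base = feature_name.split("__", 1)[1]
--         for candidate in sorted(base_columns, key=len, reverse=True):
--             prefix = f"{candidate}_"
--             if base == candidate:
--                 return candidate, candidate
--             if base.startswith(prefix):
--                 return candidate, f"{candidate} = {base[len(prefix):]}"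
--         return base, base
--     return feature_name, feature_name
-- ===== SOURCE B (Python) =====
-- def parse_feature_name(feature_name: str, base_columns: list[str]) -> tuple[str, str]:
--     if feature_name.startswith("num__") or feature_name.startswith("bool__"):
--         base = feature_name.split("__", 1)[1]
--         return base, base
--     if feature_name.startswith("cat__"):
--         base = feature_name.split("__", 1)[1]
--         best = None
--         for candidate in base_columns:
--             if (base == candidate or base.startswith(candidate + "_")) and (
--                 best is None or len(candidate) > len(best)
--             ):
--                 best = candidate
--         if best is None:
--             return base, base
--         if base == best:
--             return best, best
--         return best, f"{best} = {base[len(best) + 1:]}"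
--     return feature_name, feature_name
-- ===== Notes on version B (the rewrite author's own statement) =====
-- stated objective: alternative
-- what changed: In the cat__ branch B drops the length-descending sort and instead makes a single pass over base_columns keeping the strictly longest matching candidate (equivalent because two matching candidates of equal length must be the same string).
import Mathlib
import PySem

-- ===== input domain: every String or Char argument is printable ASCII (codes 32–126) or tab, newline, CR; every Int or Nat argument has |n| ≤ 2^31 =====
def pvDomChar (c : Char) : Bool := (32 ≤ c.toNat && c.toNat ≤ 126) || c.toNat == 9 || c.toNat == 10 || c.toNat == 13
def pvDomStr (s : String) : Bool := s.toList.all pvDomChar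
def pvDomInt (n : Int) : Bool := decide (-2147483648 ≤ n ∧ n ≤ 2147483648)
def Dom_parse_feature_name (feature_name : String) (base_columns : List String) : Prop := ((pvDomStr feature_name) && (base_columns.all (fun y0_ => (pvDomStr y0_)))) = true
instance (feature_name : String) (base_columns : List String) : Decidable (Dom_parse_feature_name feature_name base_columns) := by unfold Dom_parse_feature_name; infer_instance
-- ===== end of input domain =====

-- B replaces A's sort-then-scan of base_columns by a single pass keeping the longest matching
-- candidate (alternative decomposition, no sort); equivalence proved on all inputs.

-- ===== PORT A =====
-- shared by both ports (both Pythons contain the identical line feature_name.split("__", 1)[1]);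
-- the [] fallback is unreachable: pvSplitTail is only applied when "__" occurs in the string
def pvSplitTail (cs : List Char) : List Char :=
  match (PySem.Chars.splitMax? cs "__".toList 1).getD [] with
  | _ :: b :: _ => b
  | _ => []

-- the for-loop of A's cat__ branch over the sorted candidate list
def pvCatA (base : List Char) : List (List Char) → List Char × List Char
  | [] => (base, base)
  | candidate :: rest =>
    let pfx := candidate ++ ['_']
    if base = candidate then (candidate, candidate)
    else if PySem.Chars.startswith base pfx then
      (candidate, candidate ++ (' ' :: '=' :: ' ' :: PySem.Chars.slice base (some (pfx.length : Int)) none))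
    else pvCatA base rest

def parse_feature_name (feature_name : String) (base_columns : List String) : String × String :=
  let fn := feature_name.toList
  if PySem.Chars.startswith fn "num__".toList || PySem.Chars.startswith fn "bool__".toList then
    let base := pvSplitTail fn
    (String.ofList base, String.ofList base)
  else if PySem.Chars.startswith fn "cat__".toList then
    let base := pvSplitTail fn
    let r := pvCatA base (PySem.List.sorted (base_columns.map String.toList) List.length true)
    (String.ofList r.1, String.ofList r.2)
  else (feature_name, feature_name)

-- ===== PORT B =====
def pvMatches (base c : List Char) : Bool :=
  decide (base = c) || PySem.Chars.startswith base (c ++ ['_'])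

-- one step of B's single pass: keep the strictly longer matching candidate
def pvStep (base : List Char) (best : Option (List Char)) (c : List Char) : Option (List Char) :=
  if pvMatches base c && (match best with | none => true | some b => decide (b.length < c.length)) then
    some c
  else best

def parse_feature_name_alt (feature_name : String) (base_columns : List String) : String × String :=
  let fn := feature_name.toList
  if PySem.Chars.startswith fn "num__".toList || PySem.Chars.startswith fn "bool__".toList then
    let base := pvSplitTail fn
    (String.ofList base, String.ofList base)
  else if PySem.Chars.startswith fn "cat__".toList then
    let base := pvSplitTail fn
    match (base_columns.map String.toList).foldl (pvStep base) none with
    | none => (String.ofList base, String.ofList base)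
    | some b =>
      if base = b then (String.ofList b, String.ofList b)
      else (String.ofList b,
            String.ofList (b ++ (' ' :: '=' :: ' ' :: PySem.Chars.slice base (some ((b.length : Int) + 1)) none)))
  else (feature_name, feature_name)

-- ===== PRECONDITION & SPEC =====
def Spec_parse_feature_name (feature_name : String) (base_columns : List String) (out : String × String) : Prop := out = parse_feature_name_alt feature_name base_columns
instance (feature_name : String) (base_columns : List String) (out : String × String) : Decidable (Spec_parse_feature_name feature_name base_columns out) := by unfold Spec_parse_feature_name; infer_instance

-- ===== CLAIM (what is proved, stated in full; the proofs are below) =====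
def Claim_equal_parse_feature_name : Prop := ∀ (feature_name : String) (base_columns : List String), Dom_parse_feature_name feature_name base_columns → Spec_parse_feature_name feature_name base_columns (parse_feature_name feature_name base_columns)

-- ===== LEMMAS AND PROOFS =====

-- the value both branches of the cat__ loop body produce for a matching candidate b
def pvOut (base b : List Char) : List Char × List Char :=
  if base = b then (b, b)
  else (b, b ++ (' ' :: '=' :: ' ' :: PySem.Chars.slice base (some ((b.length : Int) + 1)) none))

-- two matching candidates of equal length are the same string
theorem pvMatches_uniq {base b c : List Char} (hb : pvMatches base b = true)
    (hc : pvMatches base c = true) (hlen : b.length = c.length) : b = c := by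
  simp only [pvMatches, Bool.or_eq_true, decide_eq_true_eq, PySem.Chars.startswith_iff] at hb hc
  rcases hb with hb | hb <;> rcases hc with hc | hc
  · rw [← hb, ← hc]
  · have h := hc.length_le
    have hb' : base.length = b.length := by rw [hb]
    simp only [List.length_append, List.length_cons, List.length_nil] at h
    omega
  · have h := hb.length_le
    have hc' : base.length = c.length := by rw [hc]
    simp only [List.length_append, List.length_cons, List.length_nil] at h
    omega
  · have h1 : (b ++ ['_']).length = (c ++ ['_']).length := by simp [hlen]
    rcases List.prefix_or_prefix_of_prefix hb hc with h | h
    · have h2 := h.eq_of_length h1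
      simpa using h2
    · have h2 := h.eq_of_length h1.symm
      exact (by simpa using h2 : c = b).symm

theorem pvCatA_none {base : List Char} : ∀ {L : List (List Char)},
    (∀ d ∈ L, pvMatches base d = false) → pvCatA base L = (base, base) := by
  intro L
  induction L with
  | nil => intro _; rfl
  | cons c rest ih =>
    intro h
    have hc := h c (by simp)
    simp only [pvMatches, Bool.or_eq_false_iff, decide_eq_false_iff_not] at hc
    simp only [pvCatA]
    rw [if_neg hc.1, if_neg (by simp [hc.2])]
    exact ih (fun d hd => h d (List.mem_cons_of_mem _ hd))

theorem pvCatA_main {base b : List Char} (hPb : pvMatches base b = true) :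
    ∀ {L : List (List Char)}, L.Pairwise (fun x y => y.length ≤ x.length) → b ∈ L →
    (∀ d ∈ L, pvMatches base d = true → d.length ≤ b.length) → pvCatA base L = pvOut base b := by
  intro L
  induction L with
  | nil => intro _ hmem _; cases hmem
  | cons c rest ih =>
    intro hpw hmem hmax
    by_cases hPc : pvMatches base c = true
    · have hcb : c = b := by
        apply pvMatches_uniq hPc hPb
        have h1 : c.length ≤ b.length := hmax c (by simp) hPc
        have h2 : b.length ≤ c.length := by
          rcases List.mem_cons.mp hmem with rfl | hbt
          · exact le_refl _
          · exact (List.pairwise_cons.mp hpw).1 b hbt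
        omega
      subst hcb
      simp only [pvMatches, Bool.or_eq_true, decide_eq_true_eq] at hPc
      simp only [pvCatA, pvOut]
      by_cases hbe : base = c
      · simp [hbe]
      · have hsw := hPc.resolve_left hbe
        rw [if_neg hbe, if_pos hsw, if_neg hbe]
        simp [List.length_append]
    · have hbt : b ∈ rest := by
        rcases List.mem_cons.mp hmem with rfl | h
        · exact absurd hPb hPc
        · exact h
      simp only [pvMatches, Bool.or_eq_true, decide_eq_true_eq] at hPc
      rw [not_or] at hPc
      simp only [pvCatA]
      rw [if_neg hPc.1, if_neg (by simp [hPc.2])]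
      exact ih (List.pairwise_cons.mp hpw).2 hbt (fun d hd => hmax d (List.mem_cons_of_mem _ hd))

-- the single-pass fold: full characterisation of its result
theorem pvFold_spec (base : List Char) : ∀ (L : List (List Char)) (acc : Option (List Char)),
    (∀ a, acc = some a → pvMatches base a = true) →
    match L.foldl (pvStep base) acc with
    | none => acc = none ∧ ∀ c ∈ L, pvMatches base c = false
    | some b => pvMatches base b = true ∧ (b ∈ L ∨ acc = some b) ∧
        (∀ d ∈ L, pvMatches base d = true → d.length ≤ b.length) ∧
        (∀ a, acc = some a → a.length ≤ b.length) := by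
  intro L
  induction L with
  | nil =>
    intro acc hacc
    cases acc with
    | none => exact ⟨rfl, by simp⟩
    | some a =>
      exact ⟨hacc a rfl, Or.inr rfl, by simp, fun x hx => by cases hx; exact le_refl _⟩
  | cons c rest ih =>
    intro acc hacc
    rw [List.foldl_cons]
    cases acc with
    | none =>
      by_cases hPc : pvMatches base c = true
      · have hstep : pvStep base none c = some c := by simp [pvStep, hPc]
        rw [hstep]
        have := ih (some c) (fun a ha => by cases ha; exact hPc)
        cases hf : rest.foldl (pvStep base) (some c) with
        | none => rw [hf] at this; exact absurd this.1 (by simp)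
        | some b =>
          rw [hf] at this
          obtain ⟨h1, h2, h3, h4⟩ := this
          refine ⟨h1, Or.inl ?_, ?_, by simp⟩
          · rcases h2 with h | h
            · exact List.mem_cons_of_mem _ h
            · cases h; exact List.mem_cons_self
          · intro d hd hPd
            rcases List.mem_cons.mp hd with rfl | hd
            · exact h4 d rfl
            · exact h3 d hd hPd
      · have hstep : pvStep base none c = none := by simp [pvStep, hPc]
        rw [hstep]
        have := ih none (by simp)
        cases hf : rest.foldl (pvStep base) (none : Option (List Char)) with
        | none =>
          rw [hf] at this
          refine ⟨rfl, ?_⟩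
          intro d hd
          rcases List.mem_cons.mp hd with rfl | hd
          · exact eq_false_of_ne_true hPc
          · exact this.2 d hd
        | some b =>
          rw [hf] at this
          obtain ⟨h1, h2, h3, h4⟩ := this
          refine ⟨h1, Or.inl ?_, ?_, by simp⟩
          · rcases h2 with h | h
            · exact List.mem_cons_of_mem _ h
            · exact absurd h (by simp)
          · intro d hd hPd
            rcases List.mem_cons.mp hd with rfl | hd
            · exact absurd hPd hPc
            · exact h3 d hd hPd
    | some a =>
      have hPa := hacc a rfl
      by_cases hcond : (pvMatches base c && decide (a.length < c.length)) = true
      · obtain ⟨hPc, hlt⟩ : pvMatches base c = true ∧ a.length < c.length := by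
          simpa using hcond
        have hstep : pvStep base (some a) c = some c := by simp [pvStep, hPc, hlt]
        rw [hstep]
        have := ih (some c) (fun x hx => by cases hx; exact hPc)
        cases hf : rest.foldl (pvStep base) (some c) with
        | none => rw [hf] at this; exact absurd this.1 (by simp)
        | some b =>
          rw [hf] at this
          obtain ⟨h1, h2, h3, h4⟩ := this
          have hcb : c.length ≤ b.length := h4 c rfl
          refine ⟨h1, Or.inl ?_, ?_, ?_⟩
          · rcases h2 with h | h
            · exact List.mem_cons_of_mem _ h
            · cases h; exact List.mem_cons_self
          · intro d hd hPd
            rcases List.mem_cons.mp hd with rfl | hd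
            · exact hcb
            · exact h3 d hd hPd
          · intro x hx; cases hx; omega
      · have hstep : pvStep base (some a) c = some a := by
          simp only [pvStep]
          rw [if_neg]
          simpa using hcond
        rw [hstep]
        have := ih (some a) hacc
        cases hf : rest.foldl (pvStep base) (some a) with
        | none => rw [hf] at this; exact absurd this.1 (by simp)
        | some b =>
          rw [hf] at this
          obtain ⟨h1, h2, h3, h4⟩ := this
          have hab : a.length ≤ b.length := h4 a rfl
          refine ⟨h1, ?_, ?_, h4⟩
          · rcases h2 with h | h
            · exact Or.inl (List.mem_cons_of_mem _ h)
            · exact Or.inr h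
          · intro d hd hPd
            rcases List.mem_cons.mp hd with rfl | hd
            · have : ¬ a.length < d.length := by
                intro hlt
                exact hcond (by simp [hPd, hlt])
              omega
            · exact h3 d hd hPd

-- the two ports agree on every input
theorem pv_eq (feature_name : String) (base_columns : List String) :
    parse_feature_name feature_name base_columns = parse_feature_name_alt feature_name base_columns := by
  unfold parse_feature_name parse_feature_name_alt
  by_cases h1 : (PySem.Chars.startswith feature_name.toList "num__".toList
      || PySem.Chars.startswith feature_name.toList "bool__".toList) = true
  · simp only [h1, if_true]
  · simp only [h1, if_false, Bool.false_eq_true]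
    by_cases h2 : PySem.Chars.startswith feature_name.toList "cat__".toList = true
    · simp only [h2, if_true]
      set base := pvSplitTail feature_name.toList with hbase
      set cols := base_columns.map String.toList with hcols
      have hspec := pvFold_spec base cols none (by simp)
      cases hf : cols.foldl (pvStep base) none with
      | none =>
        rw [hf] at hspec
        rw [pvCatA_none (fun d hd => hspec.2 d ((PySem.List.mem_sorted _ _ _ _).mp hd))]
      | some b =>
        rw [hf] at hspec
        obtain ⟨hPb, hmem, hmax, -⟩ := hspec
        have hmem' : b ∈ cols := by
          rcases hmem with h | h
          · exact h
          · exact absurd h (by simp)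
        rw [pvCatA_main hPb (PySem.List.sorted_pairwise_rev cols List.length)
          ((PySem.List.mem_sorted _ _ _ _).mpr hmem')
          (fun d hd hPd => hmax d ((PySem.List.mem_sorted _ _ _ _).mp hd) hPd)]
        simp only [pvOut]
        by_cases hbe : base = b
        · rw [if_pos hbe, if_pos hbe]
        · rw [if_neg hbe, if_neg hbe]
    · simp only [h2, if_false, Bool.false_eq_true]

-- ===== VERDICT (by name: the statement is the Claim_ definition above) =====
theorem parse_feature_name_spec : Claim_equal_parse_feature_name := by
  intro feature_name base_columns _
  unfold Spec_parse_feature_name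
  exact pv_eq feature_name base_columns
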